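-- pv_equiv track=rewrite | github.com/daybook-space/ml | daybookml/analysis.py | collapse_items
-- ===== SOURCE A (Python) =====
-- def collapse_items(items):
--     done = [False] * len(items)
--     new_items = []
--
--     for i, item in enumerate(items):
--         if done[i]:
--             continue
--         done[i] = True
--         name = set(item[0].split(" "))
--         sum_1 = item[1]
--         sum_2 = item[2]
--
--         for j, i2 in enumerate(items):
--             if done[j]:
--                 continue
--
--             ns = set(i2[0].split(" "))
--             if name & ns:
--                 done[j] = True
--                 sum_1 += i2[1]
--                 sum_2 += i2[2]
--
--         new_items.append((item[0], sum_1, sum_2))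
--
--     return new_items
-- ===== SOURCE B (Python) =====
-- def collapse_items(items):
--     # Inverted index word -> indices of items containing it; each seed gathers
--     # its candidates from the posting lists instead of rescanning all items.
--     n = len(items)
--     words = [set(it[0].split(" ")) for it in items]
--     index = {}
--     for i in range(n):
--         for w in words[i]:
--             index.setdefault(w, []).append(i)
--     done = [False] * n
--     out = []
--     for i in range(n):
--         if done[i]:
--             continue
--         done[i] = True
--         s1 = items[i][1]
--         s2 = items[i][2]
--         for w in words[i]:
--             for j in index[w]:
--                 if not done[j]:
--                     done[j] = True
--                     s1 += items[j][1]
--                     s2 += items[j][2]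
--         out.append((items[i][0], s1, s2))
--     return out
-- ===== Notes on version B (the rewrite author's own statement) =====
-- stated objective: faster
-- what changed: Replaced A's full rescan of all items per seed by an inverted index word->posting list of item indices built once; each seed gathers its absorbed items from the posting lists of its own words, so items never sharing a word are never touched together.
import Mathlib
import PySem

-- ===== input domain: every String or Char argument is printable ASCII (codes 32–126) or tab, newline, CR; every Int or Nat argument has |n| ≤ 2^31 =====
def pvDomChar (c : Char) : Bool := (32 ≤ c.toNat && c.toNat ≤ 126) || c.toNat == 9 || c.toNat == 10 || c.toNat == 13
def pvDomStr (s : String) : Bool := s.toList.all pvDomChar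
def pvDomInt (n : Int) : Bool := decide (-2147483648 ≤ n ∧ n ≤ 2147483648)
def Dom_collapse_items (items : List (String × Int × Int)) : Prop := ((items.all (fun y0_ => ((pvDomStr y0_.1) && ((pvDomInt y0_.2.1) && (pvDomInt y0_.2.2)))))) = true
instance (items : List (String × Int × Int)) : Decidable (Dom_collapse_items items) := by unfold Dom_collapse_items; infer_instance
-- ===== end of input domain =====

-- B replaces A's full rescan of all remaining items per seed by an inverted index
-- word -> posting list of item indices, built once; each seed gathers its absorbed
-- items from the posting lists of its own words (objective: faster).

-- ===== PORT A =====
-- set(x.split(" ")) — used by both Pythons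
def pvWords (s : String) : List String :=
  PySem.Set.ofList ((PySem.Str.split? s " ").getD [])

-- body of A's inner loop over enumerate(items)
def pvStepInner (name : List String) (st : List Bool × Int × Int)
    (q : Int × (String × Int × Int)) : List Bool × Int × Int :=
  if PySem.List.pyGetD st.1 q.1 false then st
  else
    let ns := pvWords q.2.1
    if PySem.Set.inter name ns ≠ [] then
      (PySem.List.pySetD st.1 q.1 true, st.2.1 + q.2.2.1, st.2.2 + q.2.2.2)
    else st

def pvInnerA (items : List (String × Int × Int)) (name : List String)
    (st0 : List Bool × Int × Int) : List Bool × Int × Int :=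
  (PySem.List.enumerate items 0).foldl (pvStepInner name) st0

-- body of A's outer loop over enumerate(items)
def pvStepOuter (items : List (String × Int × Int))
    (st : List Bool × List (String × Int × Int)) (p : Int × (String × Int × Int)) :
    List Bool × List (String × Int × Int) :=
  if PySem.List.pyGetD st.1 p.1 false then st
  else
    let done1 := PySem.List.pySetD st.1 p.1 true
    let name := pvWords p.2.1
    let r := pvInnerA items name (done1, p.2.2.1, p.2.2.2)
    (r.1, st.2 ++ [(p.2.1, r.2.1, r.2.2)])

def collapse_items (items : List (String × Int × Int)) : List (String × Int × Int) :=
  ((PySem.List.enumerate items 0).foldl (pvStepOuter items)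
    (List.replicate items.length false, [])).2

-- ===== PORT B =====
def pvDflt : String × Int × Int := ("", 0, 0)

-- index = {}; for i in range(n): for w in words[i]: index.setdefault(w, []).append(i)
def pvBuildIndex (wordsL : List (List String)) : PySem.Dict String (List Int) :=
  (PySem.List.pyRange 0 wordsL.length 1).foldl
    (fun D i => (PySem.List.pyGetD wordsL i []).foldl
      (fun D w => D.insert w (D.getD w [] ++ [i])) D)
    PySem.Dict.empty

-- for j in index[w]: if not done[j]: done[j] = True; s1 += …; s2 += …
def pvStepJ (items : List (String × Int × Int)) (st : List Bool × Int × Int)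
    (j : Int) : List Bool × Int × Int :=
  if PySem.List.pyGetD st.1 j false then st
  else (PySem.List.pySetD st.1 j true,
        st.2.1 + (PySem.List.pyGetD items j pvDflt).2.1,
        st.2.2 + (PySem.List.pyGetD items j pvDflt).2.2)

-- for w in words[i]: for j in index[w]: …   (index[w] always present; getD is exact here)
def pvInnerB (items : List (String × Int × Int)) (D : PySem.Dict String (List Int))
    (ws : List String) (st0 : List Bool × Int × Int) : List Bool × Int × Int :=
  ws.foldl (fun st w => (D.getD w []).foldl (pvStepJ items) st) st0

-- body of B's outer loop over range(n)
def pvStepOuterB (items : List (String × Int × Int)) (wordsL : List (List String))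
    (D : PySem.Dict String (List Int))
    (st : List Bool × List (String × Int × Int)) (i : Int) :
    List Bool × List (String × Int × Int) :=
  if PySem.List.pyGetD st.1 i false then st
  else
    let d1 := PySem.List.pySetD st.1 i true
    let it := PySem.List.pyGetD items i pvDflt
    let r := pvInnerB items D (PySem.List.pyGetD wordsL i []) (d1, it.2.1, it.2.2)
    (r.1, st.2 ++ [(it.1, r.2.1, r.2.2)])

def collapse_items_alt (items : List (String × Int × Int)) : List (String × Int × Int) :=
  let wordsL := items.map (fun it => pvWords it.1)
  let D := pvBuildIndex wordsL
  ((PySem.List.pyRange 0 items.length 1).foldl (pvStepOuterB items wordsL D)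
    (List.replicate items.length false, [])).2

-- ===== PRECONDITION & SPEC =====
def Spec_collapse_items (items : List (String × Int × Int)) (out : List (String × Int × Int)) : Prop := out = collapse_items_alt items
instance (items : List (String × Int × Int)) (out : List (String × Int × Int)) : Decidable (Spec_collapse_items items out) := by unfold Spec_collapse_items; infer_instance

-- ===== CLAIM (what is proved, stated in full; the proofs are below) =====
def Claim_equal_collapse_items : Prop := ∀ (items : List (String × Int × Int)), Dom_collapse_items items → Spec_collapse_items items (collapse_items items)

-- ===== LEMMAS AND PROOFS =====

-- the closed form of index[w]: the indices (in order) of the items containing w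
def pvPostings (wordsL : List (List String)) (n : Nat) (w : String) : List Int :=
  ((List.range n).filter (fun k => decide (w ∈ wordsL.getD k []))).map (fun k => ((k : Nat) : Int))

-- proof-only: marking a list of indices, reused for both ports' done arrays
def pvMark (d : List Bool) (idxs : List Int) : List Bool :=
  idxs.foldl (fun d i => PySem.List.pySetD d i true) d

def pvHitb (name : List String) (d : List Bool) (q : Int × (String × Int × Int)) : Bool :=
  !PySem.List.pyGetD d q.1 false && decide (PySem.Set.inter name (pvWords q.2.1) ≠ [])

lemma pv_getD_setD_ne (d : List Bool) (v dv : Bool) {i j : Int}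
    (hi : 0 ≤ i) (hj : 0 ≤ j) (hne : i ≠ j) :
    PySem.List.pyGetD (PySem.List.pySetD d i v) j dv = PySem.List.pyGetD d j dv := by
  rw [PySem.List.pySetD_of_nonneg _ _ hi,
      show j = ((j.toNat : Nat) : Int) from (Int.toNat_of_nonneg hj).symm,
      PySem.List.pyGetD_natCast, PySem.List.pyGetD_natCast]
  have : i.toNat ≠ j.toNat := by omega
  simp [List.getD_eq_getElem?_getD, List.getElem?_set_ne this]

lemma pv_getD_setD_self (d : List Bool) (v dv : Bool) {i : Int}
    (hi : 0 ≤ i) (hilt : i < (d.length : Int)) :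
    PySem.List.pyGetD (PySem.List.pySetD d i v) i dv = v := by
  rw [show i = ((i.toNat : Nat) : Int) from (Int.toNat_of_nonneg hi).symm,
      PySem.List.pySetD_natCast, PySem.List.pyGetD_natCast]
  have h : i.toNat < d.length := by omega
  simp [List.getD_eq_getElem?_getD, h]

lemma pv_length_mark (idxs : List Int) : ∀ (d : List Bool),
    (pvMark d idxs).length = d.length := by
  induction idxs with
  | nil => intro d; rfl
  | cons i idxs ih =>
    intro d
    simp only [pvMark, List.foldl_cons] at *
    rw [ih, PySem.List.length_pySetD]

lemma pv_getD_mark (idxs : List Int) : ∀ (d : List Bool) (j : Int), 0 ≤ j →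
    (∀ i ∈ idxs, 0 ≤ i ∧ i < (d.length : Int)) →
    PySem.List.pyGetD (pvMark d idxs) j false
      = (PySem.List.pyGetD d j false || decide (j ∈ idxs)) := by
  induction idxs with
  | nil => intro d j hj _; simp [pvMark]
  | cons i idxs ih =>
    intro d j hj hnn
    obtain ⟨hi0, hilt⟩ := hnn i (by simp)
    have hrec := ih (PySem.List.pySetD d i true) j hj
      (by intro x hx; have := hnn x (by simp [hx]); simpa [PySem.List.length_pySetD] using this)
    simp only [pvMark, List.foldl_cons] at *
    rw [hrec]
    by_cases hij : j = i
    · subst hij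
      rw [pv_getD_setD_self d true false hj hilt]
      simp
    · rw [pv_getD_setD_ne d true false hi0 hj (fun h => hij h.symm)]
      simp [List.mem_cons, hij]

lemma pv_inner_spec (name : List String) :
    ∀ (l : List (Int × (String × Int × Int))) (d : List Bool) (s1 s2 : Int),
    (∀ q ∈ l, 0 ≤ q.1) → List.Pairwise (fun p q => p.1 ≠ q.1) l →
    l.foldl (pvStepInner name) (d, s1, s2) =
      (pvMark d ((l.filter (pvHitb name d)).map (·.1)),
       s1 + ((l.filter (pvHitb name d)).map (fun q => q.2.2.1)).sum,
       s2 + ((l.filter (pvHitb name d)).map (fun q => q.2.2.2)).sum) := by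
  intro l
  induction l with
  | nil => intro d s1 s2 _ _; simp [pvMark]
  | cons q l ih =>
    intro d s1 s2 hnn hpw
    have hq0 : 0 ≤ q.1 := hnn q (by simp)
    have hnn' : ∀ p ∈ l, 0 ≤ p.1 := fun p hp => hnn p (by simp [hp])
    have hpw' := hpw.of_cons
    have hhead : ∀ p ∈ l, q.1 ≠ p.1 := fun p hp => List.rel_of_pairwise_cons hpw hp
    simp only [List.foldl_cons]
    by_cases hd : PySem.List.pyGetD d q.1 false
    · have hstep : pvStepInner name (d, s1, s2) q = (d, s1, s2) := by
        simp [pvStepInner, hd]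
      have hhit : pvHitb name d q = false := by simp [pvHitb, hd]
      rw [hstep, ih d s1 s2 hnn' hpw']
      simp [hhit]
    · by_cases hname : PySem.Set.inter name (pvWords q.2.1) ≠ []
      · have hstep : pvStepInner name (d, s1, s2) q
            = (PySem.List.pySetD d q.1 true, s1 + q.2.2.1, s2 + q.2.2.2) := by
          simp [pvStepInner, hd, hname]
        have hhit : pvHitb name d q = true := by simp [pvHitb, hd, hname]
        set d1 := PySem.List.pySetD d q.1 true with hd1
        have hfilt : l.filter (pvHitb name d1) = l.filter (pvHitb name d) := by
          apply List.filter_congr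
          intro p hp
          have : PySem.List.pyGetD d1 p.1 false = PySem.List.pyGetD d p.1 false :=
            pv_getD_setD_ne d true false hq0 (hnn' p hp) (hhead p hp)
          simp [pvHitb, this]
        rw [hstep, ih d1 (s1 + q.2.2.1) (s2 + q.2.2.2) hnn' hpw', hfilt]
        have hmark : pvMark d (((q :: l).filter (pvHitb name d)).map (·.1))
            = pvMark d1 ((l.filter (pvHitb name d)).map (·.1)) := by
          simp only [List.filter_cons, hhit, if_pos, List.map_cons, pvMark, List.foldl_cons, hd1]
        rw [hmark]
        simp [hhit, add_assoc]
      · have hstep : pvStepInner name (d, s1, s2) q = (d, s1, s2) := by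
          simp [pvStepInner, hd, hname]
        have hhit : pvHitb name d q = false := by simp [pvHitb, hd, hname]
        rw [hstep, ih d s1 s2 hnn' hpw']
        simp [hhit]

-- setdefault/append loop over one item's (distinct) word list
lemma pv_build_inner (L : List String) :
    ∀ (hnd : L.Nodup) (D : PySem.Dict String (List Int)) (i : Int) (w : String),
    (L.foldl (fun D w => D.insert w (D.getD w [] ++ [i])) D).getD w []
      = D.getD w [] ++ (if w ∈ L then [i] else []) := by
  induction L with
  | nil => intro _ D i w; simp
  | cons w0 L ih =>
    intro hnd D i w
    simp only [List.foldl_cons]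
    rw [ih hnd.of_cons]
    by_cases hw : w = w0
    · subst hw
      have hwn : w ∉ L := (List.nodup_cons.mp hnd).1
      rw [PySem.Dict.getD_insert]
      simp [hwn]
    · rw [PySem.Dict.getD_insert]
      simp [hw, List.mem_cons]

-- the whole index build: index[w] is pvPostings
lemma pv_build_spec (wordsL : List (List String))
    (hnd : ∀ j : Nat, (wordsL.getD j []).Nodup) (w : String) :
    (pvBuildIndex wordsL).getD w [] = pvPostings wordsL wordsL.length w := by
  unfold pvBuildIndex
  rw [show ((wordsL.length : Int)) = ((wordsL.length : Nat) : Int) from rfl,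
      PySem.List.pyRange_zero_nat, List.foldl_map]
  have key : ∀ (k : Nat) (w : String),
      ((List.range k).foldl (fun D (j : Nat) =>
          (PySem.List.pyGetD wordsL ((j : Nat) : Int) []).foldl
            (fun D w => D.insert w (D.getD w [] ++ [((j : Nat) : Int)])) D)
        PySem.Dict.empty).getD w []
      = pvPostings wordsL k w := by
    intro k
    induction k with
    | zero => intro w; simp [pvPostings]
    | succ k ihk =>
      intro w
      rw [List.range_succ, List.foldl_append, List.foldl_cons, List.foldl_nil]
      rw [pv_build_inner _ (by simpa [PySem.List.pyGetD_natCast] using hnd k), ihk]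
      simp only [pvPostings, List.range_succ, List.filter_append, List.map_append,
        List.filter_cons, List.filter_nil, PySem.List.pyGetD_natCast]
      by_cases hmem2 : w ∈ wordsL[k]?.getD []
      · simp [hmem2]
      · simp [hmem2]
  exact key wordsL.length w

-- sums over range n that differ at exactly one point
lemma pv_sum_point (n j : Nat) (hj : j < n) (F G : Nat → Int) (v : Int)
    (hG : ∀ k, k < n → G k = F k + (if k = j then v else 0)) :
    ((List.range n).map G).sum = ((List.range n).map F).sum + v := by
  have h1 : ((List.range n).map G).sum = ∑ k ∈ Finset.range n, G k := rfl
  have h2 : ((List.range n).map F).sum = ∑ k ∈ Finset.range n, F k := rfl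
  rw [h1, h2]
  have h3 : ∑ k ∈ Finset.range n, G k
      = ∑ k ∈ Finset.range n, (F k + (if k = j then v else 0)) :=
    Finset.sum_congr rfl (fun k hk => hG k (Finset.mem_range.mp hk))
  rw [h3, Finset.sum_add_distrib, Finset.sum_ite_eq' (Finset.range n) j (fun _ => v)]
  simp [Finset.mem_range.mpr hj]

-- one posting-list pass of B's inner loop
lemma pv_innerJ (items : List (String × Int × Int)) : ∀ (L : List Int),
    (∀ j ∈ L, 0 ≤ j ∧ j < (items.length : Int)) → L.Nodup →
    ∀ (d : List Bool) (s1 s2 : Int), d.length = items.length →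
    (L.foldl (pvStepJ items) (d, s1, s2)).1.length = items.length ∧
    (∀ m : Nat, (L.foldl (pvStepJ items) (d, s1, s2)).1.getD m false
        = (d.getD m false || decide (((m : Nat) : Int) ∈ L))) ∧
    (L.foldl (pvStepJ items) (d, s1, s2)).2.1
      = s1 + ((List.range items.length).map (fun k =>
          if (((k : Nat) : Int) ∈ L ∧ d.getD k false = false)
          then (items.getD k pvDflt).2.1 else 0)).sum ∧
    (L.foldl (pvStepJ items) (d, s1, s2)).2.2
      = s2 + ((List.range items.length).map (fun k =>
          if (((k : Nat) : Int) ∈ L ∧ d.getD k false = false)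
          then (items.getD k pvDflt).2.2 else 0)).sum := by
  intro L
  induction L with
  | nil =>
    intro _ _ d s1 s2 hd
    refine ⟨hd, ?_, ?_, ?_⟩ <;> simp
  | cons j L ih =>
    intro hmem hnd d s1 s2 hd
    obtain ⟨hj0, hjn⟩ := hmem j (by simp)
    have hmem' : ∀ x ∈ L, 0 ≤ x ∧ x < (items.length : Int) :=
      fun x hx => hmem x (List.mem_cons_of_mem _ hx)
    have hnd' := hnd.of_cons
    have hjeq : j = ((j.toNat : Nat) : Int) := by omega
    have hcastd : ∀ (e : List Bool), PySem.List.pyGetD e j false = e.getD j.toNat false := by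
      intro e
      have h := PySem.List.pyGetD_natCast e j.toNat false
      rw [← hjeq] at h
      exact h
    simp only [List.foldl_cons]
    by_cases hdj : PySem.List.pyGetD d j false
    · have hdjn : d.getD j.toNat false = true := by rw [← hcastd d]; exact hdj
      have hdjn' : d[j.toNat]?.getD false = true := by
        rw [← List.getD_eq_getElem?_getD]; exact hdjn
      have hstep : pvStepJ items (d, s1, s2) j = (d, s1, s2) := by simp [pvStepJ, hdj]
      rw [hstep]
      obtain ⟨h1, h2, h3, h4⟩ := ih hmem' hnd' d s1 s2 hd
      refine ⟨h1, ?_, ?_, ?_⟩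
      · intro m
        rw [h2 m]
        by_cases hm : ((m : Nat) : Int) = j
        · have hmj : m = j.toNat := by omega
          subst hmj
          simp only [hdjn, Bool.true_or]
        · have hmi : (((m : Nat) : Int) ∈ j :: L) ↔ (((m : Nat) : Int) ∈ L) := by
            simp [List.mem_cons, hm]
          simp only [hmi]
      · rw [h3]
        congr 2
        apply List.map_congr_left
        intro k hk
        by_cases hkj : ((k : Nat) : Int) = j
        · have hke : k = j.toNat := by omega
          subst hke
          simp [hdjn, hdjn']
        · have hmi : (((k : Nat) : Int) ∈ j :: L) ↔ (((k : Nat) : Int) ∈ L) := by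
            simp [List.mem_cons, hkj]
          simp only [hmi]
      · rw [h4]
        congr 2
        apply List.map_congr_left
        intro k hk
        by_cases hkj : ((k : Nat) : Int) = j
        · have hke : k = j.toNat := by omega
          subst hke
          simp [hdjn, hdjn']
        · have hmi : (((k : Nat) : Int) ∈ j :: L) ↔ (((k : Nat) : Int) ∈ L) := by
            simp [List.mem_cons, hkj]
          simp only [hmi]
    · have hdjn : d.getD j.toNat false = false := by
        rw [← hcastd d]; simpa using hdj
      have hdjn' : d[j.toNat]?.getD false = false := by
        rw [← List.getD_eq_getElem?_getD]; exact hdjn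
      have hstep : pvStepJ items (d, s1, s2) j
          = (PySem.List.pySetD d j true,
             s1 + (PySem.List.pyGetD items j pvDflt).2.1,
             s2 + (PySem.List.pyGetD items j pvDflt).2.2) := by
        simp [pvStepJ, hdj]
      set d1 := PySem.List.pySetD d j true with hd1def
      have hd1 : d1.length = items.length := by
        rw [hd1def, PySem.List.length_pySetD]; exact hd
      have hgd1 : ∀ m : Nat, d1.getD m false
          = (decide (((m : Nat) : Int) = j) || d.getD m false) := by
        intro m
        by_cases hmj : ((m : Nat) : Int) = j
        · have hlt : j < (d.length : Int) := by rw [hd]; exact hjn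
          have hs : PySem.List.pyGetD d1 j false = true := by
            rw [hd1def]; exact pv_getD_setD_self d true false hj0 hlt
          rw [hcastd d1] at hs
          have hmje : m = j.toNat := by omega
          subst hmje
          rw [hs]
          simp [hmj]
        · have hs := pv_getD_setD_ne d true false (i := j) (j := ((m : Nat) : Int))
            hj0 (by positivity) (fun h => hmj h.symm)
          rw [PySem.List.pyGetD_natCast, PySem.List.pyGetD_natCast, ← hd1def] at hs
          rw [hs]
          simp [hmj]
      have hd1k : d1.getD j.toNat false = true := by
        rw [hgd1 j.toNat]; simp [← hjeq]
      have hd1k' : d1[j.toNat]?.getD false = true := by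
        rw [← List.getD_eq_getElem?_getD]; exact hd1k
      have hmem1 : ((j.toNat : Nat) : Int) ∈ j :: L := by
        rw [← hjeq]; exact List.mem_cons_self
      have hval : PySem.List.pyGetD items j pvDflt = items.getD j.toNat pvDflt := by
        have h := PySem.List.pyGetD_natCast items j.toNat pvDflt
        rw [← hjeq] at h
        exact h
      have hjt : j.toNat < items.length := by omega
      obtain ⟨h1, h2, h3, h4⟩ := ih hmem' hnd' d1
        (s1 + (PySem.List.pyGetD items j pvDflt).2.1)
        (s2 + (PySem.List.pyGetD items j pvDflt).2.2) hd1
      rw [hstep]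
      refine ⟨h1, ?_, ?_, ?_⟩
      · intro m
        rw [h2 m, hgd1 m]
        cases hdm : d.getD m false <;> by_cases hmm : ((m : Nat) : Int) = j <;>
          by_cases hml : ((m : Nat) : Int) ∈ L <;>
          simp [List.mem_cons, hdm, hmm, hml]
      · rw [h3]
        have hpoint := pv_sum_point items.length j.toNat hjt
          (fun k => if (((k : Nat) : Int) ∈ L ∧ d1.getD k false = false)
            then (items.getD k pvDflt).2.1 else 0)
          (fun k => if (((k : Nat) : Int) ∈ j :: L ∧ d.getD k false = false)
            then (items.getD k pvDflt).2.1 else 0)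
          ((items.getD j.toNat pvDflt).2.1) ?_
        · rw [hpoint, hval]; ring
        · intro k hk
          by_cases hkj : k = j.toNat
          · subst hkj
            simp [Int.toNat_of_nonneg hj0, hmem1, hdjn, hdjn', hd1k, hd1k']
          · have hkj' : ((k : Nat) : Int) ≠ j := by omega
            have hmi : (((k : Nat) : Int) ∈ j :: L) ↔ (((k : Nat) : Int) ∈ L) := by
              simp [List.mem_cons, hkj']
            have hdd : d1.getD k false = d.getD k false := by
              rw [hgd1 k]; simp [hkj']
            have hdd' : d1[k]?.getD false = d[k]?.getD false := by
              rw [← List.getD_eq_getElem?_getD, ← List.getD_eq_getElem?_getD]; exact hdd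
            simp [hmi, hdd, hdd', hkj]
      · rw [h4]
        have hpoint := pv_sum_point items.length j.toNat hjt
          (fun k => if (((k : Nat) : Int) ∈ L ∧ d1.getD k false = false)
            then (items.getD k pvDflt).2.2 else 0)
          (fun k => if (((k : Nat) : Int) ∈ j :: L ∧ d.getD k false = false)
            then (items.getD k pvDflt).2.2 else 0)
          ((items.getD j.toNat pvDflt).2.2) ?_
        · rw [hpoint, hval]; ring
        · intro k hk
          by_cases hkj : k = j.toNat
          · subst hkj
            simp [Int.toNat_of_nonneg hj0, hmem1, hdjn, hdjn', hd1k, hd1k']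
          · have hkj' : ((k : Nat) : Int) ≠ j := by omega
            have hmi : (((k : Nat) : Int) ∈ j :: L) ↔ (((k : Nat) : Int) ∈ L) := by
              simp [List.mem_cons, hkj']
            have hdd : d1.getD k false = d.getD k false := by
              rw [hgd1 k]; simp [hkj']
            have hdd' : d1[k]?.getD false = d[k]?.getD false := by
              rw [← List.getD_eq_getElem?_getD, ← List.getD_eq_getElem?_getD]; exact hdd
            simp [hmi, hdd, hdd', hkj]

-- B's double loop over the seed's word list
lemma pv_innerB_spec (items : List (String × Int × Int)) (wordsL : List (List String))
    (D : PySem.Dict String (List Int))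
    (hWL : wordsL.length = items.length)
    (hD : ∀ w, D.getD w [] = pvPostings wordsL items.length w) :
    ∀ (N : List String) (d : List Bool) (s1 s2 : Int), d.length = items.length →
    (pvInnerB items D N (d, s1, s2)).1.length = items.length ∧
    (∀ m : Nat, (pvInnerB items D N (d, s1, s2)).1.getD m false
        = (d.getD m false || decide (∃ w ∈ N, w ∈ wordsL.getD m []))) ∧
    (pvInnerB items D N (d, s1, s2)).2.1
      = s1 + ((List.range items.length).map (fun k =>
          if (d.getD k false = false ∧ ∃ w ∈ N, w ∈ wordsL.getD k [])
          then (items.getD k pvDflt).2.1 else 0)).sum ∧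
    (pvInnerB items D N (d, s1, s2)).2.2
      = s2 + ((List.range items.length).map (fun k =>
          if (d.getD k false = false ∧ ∃ w ∈ N, w ∈ wordsL.getD k [])
          then (items.getD k pvDflt).2.2 else 0)).sum := by
  have hb : ∀ (w : String), ∀ j ∈ D.getD w [], 0 ≤ j ∧ j < (items.length : Int) := by
    intro w j hj
    rw [hD w] at hj
    simp only [pvPostings] at hj
    rcases List.mem_map.mp hj with ⟨k, hk, rfl⟩
    have := List.mem_range.mp (List.mem_filter.mp hk).1
    omega
  have hndP : ∀ (w : String), (D.getD w []).Nodup := by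
    intro w
    rw [hD w]
    simp only [pvPostings]
    exact ((List.nodup_range).filter _).map (fun a b h => by exact_mod_cast h)
  have hmemP : ∀ (w : String) (m : Nat),
      (((m : Nat) : Int) ∈ D.getD w []) ↔ (w ∈ wordsL.getD m []) := by
    intro w m
    rw [hD w]
    simp only [pvPostings]
    constructor
    · intro h
      rcases List.mem_map.mp h with ⟨k, hk, he⟩
      have hkm : k = m := by exact_mod_cast he
      subst hkm
      have := List.mem_filter.mp hk
      simpa using this.2
    · intro h
      have hm : m < items.length := by
        by_contra hge
        push_neg at hge
        rw [List.getD_eq_default _ _ (by omega : wordsL.length ≤ m)] at h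
        simp at h
      exact List.mem_map.mpr ⟨m,
        List.mem_filter.mpr ⟨List.mem_range.mpr hm, by simpa using h⟩, rfl⟩
  intro N
  induction N with
  | nil =>
    intro d s1 s2 hd
    refine ⟨hd, ?_, ?_, ?_⟩ <;> simp [pvInnerB]
  | cons w N ih =>
    intro d s1 s2 hd
    have hunf : pvInnerB items D (w :: N) (d, s1, s2)
        = pvInnerB items D N ((D.getD w []).foldl (pvStepJ items) (d, s1, s2)) := rfl
    obtain ⟨hJ1, hJ2, hJ3, hJ4⟩ :=
      pv_innerJ items (D.getD w []) (hb w) (hndP w) d s1 s2 hd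
    rcases hmid : (D.getD w []).foldl (pvStepJ items) (d, s1, s2) with ⟨d', s1', s2'⟩
    rw [hmid] at hJ1 hJ2 hJ3 hJ4
    simp only at hJ1 hJ2 hJ3 hJ4
    obtain ⟨hI1, hI2, hI3, hI4⟩ := ih d' s1' s2' hJ1
    rw [hunf, hmid]
    have hexc : ∀ m : Nat, (∃ x ∈ w :: N, x ∈ wordsL.getD m [])
        ↔ (w ∈ wordsL.getD m [] ∨ ∃ x ∈ N, x ∈ wordsL.getD m []) := by
      intro m
      constructor
      · rintro ⟨x, hx, hxm⟩
        rcases List.mem_cons.mp hx with h | h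
        · exact Or.inl (h ▸ hxm)
        · exact Or.inr ⟨x, h, hxm⟩
      · rintro (h | ⟨x, hx, hxm⟩)
        · exact ⟨w, List.mem_cons_self, h⟩
        · exact ⟨x, List.mem_cons_of_mem _ hx, hxm⟩
    have hexc' : ∀ m : Nat, (∃ x ∈ w :: N, x ∈ wordsL[m]?.getD [])
        ↔ (w ∈ wordsL[m]?.getD [] ∨ ∃ x ∈ N, x ∈ wordsL[m]?.getD []) := by
      intro m
      have h := hexc m
      simp only [List.getD_eq_getElem?_getD] at h
      exact h
    refine ⟨hI1, ?_, ?_, ?_⟩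
    · intro m
      rw [hI2 m, hJ2 m]
      cases hdm : d.getD m false <;> by_cases hw1 : w ∈ wordsL.getD m [] <;>
        by_cases hN : ∃ x ∈ N, x ∈ wordsL.getD m [] <;>
        simp [hexc m, hmemP w m, hdm, hw1, hN]
    · rw [hI3, hJ3, add_assoc, ← PySem.List.sum_map_add_int]
      congr 1
      congr 1
      apply List.map_congr_left
      intro k hk
      have hdk' : d'.getD k false = (d.getD k false || decide (w ∈ wordsL.getD k [])) := by
        rw [hJ2 k]
        by_cases hw1 : w ∈ wordsL.getD k [] <;> simp [hmemP w k, hw1]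
      simp only [List.getD_eq_getElem?_getD] at hdk'
      have hmw : (((k : Nat) : Int) ∈ D.getD w []) ↔ w ∈ wordsL[k]?.getD [] := by
        have h := hmemP w k
        simp only [List.getD_eq_getElem?_getD] at h
        exact h
      cases hdm : d[k]?.getD false <;> by_cases hw1 : w ∈ wordsL[k]?.getD [] <;>
        by_cases hN : ∃ x ∈ N, x ∈ wordsL[k]?.getD [] <;>
        simp [hmw, hdk', hdm, hw1, hN]
    · rw [hI4, hJ4, add_assoc, ← PySem.List.sum_map_add_int]
      congr 1
      congr 1
      apply List.map_congr_left
      intro k hk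
      have hdk' : d'.getD k false = (d.getD k false || decide (w ∈ wordsL.getD k [])) := by
        rw [hJ2 k]
        by_cases hw1 : w ∈ wordsL.getD k [] <;> simp [hmemP w k, hw1]
      simp only [List.getD_eq_getElem?_getD] at hdk'
      have hmw : (((k : Nat) : Int) ∈ D.getD w []) ↔ w ∈ wordsL[k]?.getD [] := by
        have h := hmemP w k
        simp only [List.getD_eq_getElem?_getD] at h
        exact h
      cases hdm : d[k]?.getD false <;> by_cases hw1 : w ∈ wordsL[k]?.getD [] <;>
        by_cases hN : ∃ x ∈ N, x ∈ wordsL[k]?.getD [] <;>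
        simp [hmw, hdk', hdm, hw1, hN]

-- ((l.filter p).map g).sum as a sum of if-terms
lemma pv_sum_filter {α : Type} (l : List α) (p : α → Bool) (g : α → Int) :
    ((l.filter p).map g).sum = (l.map (fun x => if p x then g x else 0)).sum := by
  induction l with
  | nil => rfl
  | cons x l ih =>
    by_cases hx : p x
    · simp [hx, ih]
    · simp [hx, ih]

-- the two outer-loop bodies agree on in-range indices and preserve the done length
lemma pv_step_eq (items : List (String × Int × Int)) (wordsL : List (List String))
    (D : PySem.Dict String (List Int))
    (hWL : wordsL = items.map (fun it => pvWords it.1))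
    (hD : ∀ w, D.getD w [] = pvPostings wordsL items.length w)
    (j : Int) (hj0 : 0 ≤ j) (hjn : j < (items.length : Int))
    (d : List Bool) (acc : List (String × Int × Int)) (hd : d.length = items.length) :
    pvStepOuter items (d, acc) (j, PySem.List.pyGetD items j pvDflt)
      = pvStepOuterB items wordsL D (d, acc) j ∧
    (pvStepOuterB items wordsL D (d, acc) j).1.length = items.length := by
  have hjeq : j = ((j.toNat : Nat) : Int) := by omega
  have hkn : j.toNat < items.length := by omega
  have hWLlen : wordsL.length = items.length := by rw [hWL]; simp
  by_cases hdj : PySem.List.pyGetD d j false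
  · constructor
    · simp [pvStepOuter, pvStepOuterB, hdj]
    · simp [pvStepOuterB, hdj, hd]
  · set d1 := PySem.List.pySetD d j true with hd1def
    have hd1len : d1.length = items.length := by
      rw [hd1def, PySem.List.length_pySetD]; exact hd
    set it := PySem.List.pyGetD items j pvDflt with hitdef
    have hit : it = items.getD j.toNat pvDflt := by
      have h := PySem.List.pyGetD_natCast items j.toNat pvDflt
      rw [← hjeq] at h
      rw [hitdef, h]
    set name := pvWords it.1 with hnamedef
    have hwk : ∀ m : Nat, m < items.length →
        wordsL.getD m [] = pvWords ((items.getD m pvDflt).1) := by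
      intro m hm
      rw [hWL, List.getD_eq_getElem _ _ (by simpa using hm), List.getElem_map,
          List.getD_eq_getElem _ _ hm]
    have hwk' : ∀ m : Nat, items.length ≤ m → wordsL.getD m [] = [] := by
      intro m hm
      exact List.getD_eq_default _ _ (by omega)
    have hws : PySem.List.pyGetD wordsL j [] = name := by
      have h := PySem.List.pyGetD_natCast wordsL j.toNat []
      rw [← hjeq] at h
      rw [h, hwk j.toNat hkn, hnamedef, hit]
    have hinter : ∀ (s t : List String),
        (PySem.Set.inter s t ≠ []) ↔ ∃ w ∈ s, w ∈ t := by
      intro s t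
      constructor
      · intro h
        cases hI : PySem.Set.inter s t with
        | nil => exact absurd hI h
        | cons x xs =>
          have hx : x ∈ PySem.Set.inter s t := by rw [hI]; exact List.mem_cons_self
          rw [PySem.Set.mem_inter] at hx
          exact ⟨x, hx.1, hx.2⟩
      · rintro ⟨w, hw1, hw2⟩ hnil
        have hw : w ∈ PySem.Set.inter s t := (PySem.Set.mem_inter s t w).mpr ⟨hw1, hw2⟩
        rw [hnil] at hw
        simp at hw
    -- A's inner loop, in range form
    have hEnn : ∀ q ∈ PySem.List.enumerate items 0, 0 ≤ q.1 := by
      intro q hq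
      rw [PySem.List.mem_enumerate_iff] at hq
      obtain ⟨k, hk, rfl⟩ := hq
      simp
    have hEpw : List.Pairwise (fun p q => p.1 ≠ q.1) (PySem.List.enumerate items 0) :=
      (PySem.List.pairwise_lt_enumerate items 0).imp (fun h => ne_of_lt h)
    have hA := pv_inner_spec name (PySem.List.enumerate items 0) d1 it.2.1 it.2.2 hEnn hEpw
    have henum : PySem.List.enumerate items 0
        = (List.range items.length).map (fun m => (((m : Nat) : Int), items.getD m pvDflt)) := by
      have h0 : PySem.List.enumerate items 0 = PySem.List.enumerate items := rfl
      rw [h0, PySem.List.enumerate_eq_map_pyRange items pvDflt,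
          show PySem.List.len items = ((items.length : Nat) : Int) from by
            simp [PySem.List.len],
          PySem.List.pyRange_zero_nat, List.map_map]
      apply List.map_congr_left
      intro m hm
      simp [PySem.List.pyGetD_natCast]
    set q : Nat → Bool := fun m => pvHitb name d1 (((m : Nat) : Int), items.getD m pvDflt) with hqdef
    have hq : ∀ m : Nat, q m
        = (!(d1[m]?.getD false) && decide (PySem.Set.inter name (pvWords ((items[m]?.getD pvDflt).1)) ≠ [])) := by
      intro m
      rw [hqdef]
      simp [pvHitb, PySem.List.pyGetD_natCast, List.getD_eq_getElem?_getD]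
    have hfilt : (PySem.List.enumerate items 0).filter (pvHitb name d1)
        = ((List.range items.length).filter q).map
            (fun m => (((m : Nat) : Int), items.getD m pvDflt)) := by
      rw [henum, List.filter_map]
      rfl
    rw [hfilt] at hA
    -- B's inner loop
    obtain ⟨hB1, hB2, hB3, hB4⟩ := pv_innerB_spec items wordsL D hWLlen hD
      (PySem.List.pyGetD wordsL j []) d1 it.2.1 it.2.2 hd1len
    -- the index list A marks
    set idxA := (((List.range items.length).filter q).map
        (fun m => (((m : Nat) : Int), items.getD m pvDflt))).map (·.1) with hidxAdef
    have hidxA : idxA = ((List.range items.length).filter q).map (fun m => ((m : Nat) : Int)) := by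
      rw [hidxAdef, List.map_map]
      rfl
    have hup : ∀ i ∈ idxA, 0 ≤ i ∧ i < (d1.length : Int) := by
      intro i hi
      rw [hidxA] at hi
      rcases List.mem_map.mp hi with ⟨m, hm, rfl⟩
      have := List.mem_range.mp (List.mem_filter.mp hm).1
      constructor
      · positivity
      · rw [hd1len]; exact_mod_cast this
    have hidxmem : ∀ m : Nat, (((m : Nat) : Int) ∈ idxA) ↔ (m < items.length ∧ q m = true) := by
      intro m
      rw [hidxA]
      constructor
      · intro h
        rcases List.mem_map.mp h with ⟨m', hm', he⟩
        have : m' = m := by exact_mod_cast he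
        subst this
        have h2 := List.mem_filter.mp hm'
        exact ⟨List.mem_range.mp h2.1, h2.2⟩
      · rintro ⟨h1, h2⟩
        exact List.mem_map.mpr ⟨m, List.mem_filter.mpr ⟨List.mem_range.mpr h1, h2⟩, rfl⟩
    have hmarkget : ∀ m : Nat, (pvMark d1 idxA).getD m false
        = (d1.getD m false || decide (((m : Nat) : Int) ∈ idxA)) := by
      intro m
      have h := pv_getD_mark idxA d1 ((m : Nat) : Int) (by positivity) hup
      rw [PySem.List.pyGetD_natCast, PySem.List.pyGetD_natCast] at h
      exact h
    -- pointwise agreement of the two done arrays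
    have hpt : ∀ m : Nat, (pvMark d1 idxA).getD m false
        = (pvInnerB items D (PySem.List.pyGetD wordsL j []) (d1, it.2.1, it.2.2)).1.getD m false := by
      intro m
      rw [hmarkget m, hB2 m, hws]
      simp only [List.getD_eq_getElem?_getD]
      by_cases hm : m < items.length
      · have hwkm : wordsL[m]?.getD [] = pvWords ((items[m]?.getD pvDflt).1) := by
          have h := hwk m hm
          simp only [List.getD_eq_getElem?_getD] at h
          exact h
        have hie : items[m]?.getD pvDflt = items[m] := by
          simp [List.getElem?_eq_getElem hm]
        rw [hie] at hwkm
        rw [hwkm]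
        by_cases hdm : d1[m]?.getD false = true
        · simp [hdm]
        · have hdm' : d1[m]?.getD false = false := by simpa using hdm
          by_cases hX : ∃ w ∈ name, w ∈ pvWords (items[m].1)
          · have hq1 : q m = true := by
              rw [hq m, hie, hdm']
              simp [(hinter _ _).mpr hX]
            simp [hdm', hidxmem m, hm, hq1, hX]
          · have hq0 : q m = false := by
              rw [hq m, hie, hdm']
              have hni : ¬ (PySem.Set.inter name (pvWords (items[m].1)) ≠ []) :=
                fun hne => hX ((hinter _ _).mp hne)
              simp [hni]
            simp [hdm', hidxmem m, hq0, hX]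
      · have h1 : d1[m]?.getD false = false := by
          have h := List.getD_eq_default d1 false (n := m) (by omega)
          simpa [List.getD_eq_getElem?_getD] using h
        have h2 : wordsL[m]?.getD [] = ([] : List String) := by
          have h := hwk' m (by omega)
          simpa [List.getD_eq_getElem?_getD] using h
        simp [h1, h2, hidxmem m, hm]
    have harr : pvMark d1 idxA
        = (pvInnerB items D (PySem.List.pyGetD wordsL j []) (d1, it.2.1, it.2.2)).1 := by
      apply List.ext_getElem
      · rw [pv_length_mark, hd1len, hB1]
      · intro i h1 h2
        have h := hpt i
        rwa [List.getD_eq_getElem _ _ h1, List.getD_eq_getElem _ _ h2] at h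
    -- the two sums agree
    have hsum1 : ((((List.range items.length).filter q).map
          (fun m => (((m : Nat) : Int), items.getD m pvDflt))).map (fun p => p.2.2.1)).sum
        = ((List.range items.length).map (fun k =>
            if (d1.getD k false = false ∧ ∃ w ∈ PySem.List.pyGetD wordsL j [], w ∈ wordsL.getD k [])
            then (items.getD k pvDflt).2.1 else 0)).sum := by
      rw [List.map_map, show ((fun p : Int × (String × Int × Int) => p.2.2.1) ∘
            (fun m : Nat => (((m : Nat) : Int), items.getD m pvDflt)))
          = (fun m : Nat => (items.getD m pvDflt).2.1) from rfl,
          pv_sum_filter]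
      congr 1
      apply List.map_congr_left
      intro m hm
      have hmn := List.mem_range.mp hm
      have hwkm : wordsL.getD m [] = pvWords ((items[m]?.getD pvDflt).1) := by
        rw [hwk m hmn]
        simp [List.getD_eq_getElem?_getD]
      rw [hws, hq m, hwkm]
      by_cases hdm : d1[m]?.getD false = true
      · simp [hdm, List.getD_eq_getElem?_getD]
      · have hdm' : d1[m]?.getD false = false := by simpa using hdm
        by_cases hX : ∃ w ∈ name, w ∈ pvWords ((items[m]?.getD pvDflt).1)
        · simp [hdm', hX, (hinter _ _).mpr hX, List.getD_eq_getElem?_getD]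
        · have hni : ¬ (PySem.Set.inter name (pvWords ((items[m]?.getD pvDflt).1)) ≠ []) :=
            fun hne => hX ((hinter _ _).mp hne)
          simp [hdm', hX, hni, List.getD_eq_getElem?_getD]
    have hsum2 : ((((List.range items.length).filter q).map
          (fun m => (((m : Nat) : Int), items.getD m pvDflt))).map (fun p => p.2.2.2)).sum
        = ((List.range items.length).map (fun k =>
            if (d1.getD k false = false ∧ ∃ w ∈ PySem.List.pyGetD wordsL j [], w ∈ wordsL.getD k [])
            then (items.getD k pvDflt).2.2 else 0)).sum := by
      rw [List.map_map, show ((fun p : Int × (String × Int × Int) => p.2.2.2) ∘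
            (fun m : Nat => (((m : Nat) : Int), items.getD m pvDflt)))
          = (fun m : Nat => (items.getD m pvDflt).2.2) from rfl,
          pv_sum_filter]
      congr 1
      apply List.map_congr_left
      intro m hm
      have hmn := List.mem_range.mp hm
      have hwkm : wordsL.getD m [] = pvWords ((items[m]?.getD pvDflt).1) := by
        rw [hwk m hmn]
        simp [List.getD_eq_getElem?_getD]
      rw [hws, hq m, hwkm]
      by_cases hdm : d1[m]?.getD false = true
      · simp [hdm, List.getD_eq_getElem?_getD]
      · have hdm' : d1[m]?.getD false = false := by simpa using hdm
        by_cases hX : ∃ w ∈ name, w ∈ pvWords ((items[m]?.getD pvDflt).1)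
        · simp [hdm', hX, (hinter _ _).mpr hX, List.getD_eq_getElem?_getD]
        · have hni : ¬ (PySem.Set.inter name (pvWords ((items[m]?.getD pvDflt).1)) ≠ []) :=
            fun hne => hX ((hinter _ _).mp hne)
          simp [hdm', hX, hni, List.getD_eq_getElem?_getD]
    -- assemble
    have hstepA : pvStepOuter items (d, acc) (j, it)
        = ((pvInnerA items name (d1, it.2.1, it.2.2)).1,
           acc ++ [(it.1, (pvInnerA items name (d1, it.2.1, it.2.2)).2.1,
                    (pvInnerA items name (d1, it.2.1, it.2.2)).2.2)]) := by
      simp [pvStepOuter, hdj, ← hd1def, ← hnamedef]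
    have hstepB : pvStepOuterB items wordsL D (d, acc) j
        = ((pvInnerB items D (PySem.List.pyGetD wordsL j []) (d1, it.2.1, it.2.2)).1,
           acc ++ [(it.1, (pvInnerB items D (PySem.List.pyGetD wordsL j []) (d1, it.2.1, it.2.2)).2.1,
                    (pvInnerB items D (PySem.List.pyGetD wordsL j []) (d1, it.2.1, it.2.2)).2.2)]) := by
      simp [pvStepOuterB, hdj, ← hd1def, ← hitdef]
    have hc1 : (pvInnerA items name (d1, it.2.1, it.2.2)).1
        = (pvInnerB items D (PySem.List.pyGetD wordsL j []) (d1, it.2.1, it.2.2)).1 := by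
      rw [show pvInnerA items name (d1, it.2.1, it.2.2)
            = (PySem.List.enumerate items 0).foldl (pvStepInner name) (d1, it.2.1, it.2.2) from rfl,
          hA]
      exact harr
    have hc2 : (pvInnerA items name (d1, it.2.1, it.2.2)).2.1
        = (pvInnerB items D (PySem.List.pyGetD wordsL j []) (d1, it.2.1, it.2.2)).2.1 := by
      rw [show pvInnerA items name (d1, it.2.1, it.2.2)
            = (PySem.List.enumerate items 0).foldl (pvStepInner name) (d1, it.2.1, it.2.2) from rfl,
          hA, hB3]
      simpa using hsum1
    have hc3 : (pvInnerA items name (d1, it.2.1, it.2.2)).2.2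
        = (pvInnerB items D (PySem.List.pyGetD wordsL j []) (d1, it.2.1, it.2.2)).2.2 := by
      rw [show pvInnerA items name (d1, it.2.1, it.2.2)
            = (PySem.List.enumerate items 0).foldl (pvStepInner name) (d1, it.2.1, it.2.2) from rfl,
          hA, hB4]
      simpa using hsum2
    constructor
    · rw [hstepA, hstepB, hc1, hc2, hc3]
    · rw [hstepB]
      exact hB1

-- the two outer folds agree step by step
lemma pv_fold_eq (items : List (String × Int × Int)) (wordsL : List (List String))
    (D : PySem.Dict String (List Int))
    (hWL : wordsL = items.map (fun it => pvWords it.1))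
    (hD : ∀ w, D.getD w [] = pvPostings wordsL items.length w) :
    ∀ (l : List Int), (∀ j ∈ l, 0 ≤ j ∧ j < (items.length : Int)) →
    ∀ (d : List Bool) (acc : List (String × Int × Int)), d.length = items.length →
    l.foldl (fun st j => pvStepOuter items st (j, PySem.List.pyGetD items j pvDflt)) (d, acc)
      = l.foldl (pvStepOuterB items wordsL D) (d, acc) := by
  intro l
  induction l with
  | nil => intro _ d acc _; rfl
  | cons j l ih =>
    intro hmem d acc hd
    obtain ⟨hj0, hjn⟩ := hmem j (by simp)
    obtain ⟨hstep, hlen⟩ := pv_step_eq items wordsL D hWL hD j hj0 hjn d acc hd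
    simp only [List.foldl_cons]
    rw [hstep]
    rcases hB : pvStepOuterB items wordsL D (d, acc) j with ⟨d2, acc2⟩
    rw [hB] at hlen
    exact ih (fun x hx => hmem x (List.mem_cons_of_mem _ hx)) d2 acc2 hlen

-- ===== VERDICT (by name: the statement is the Claim_ definition above) =====
theorem collapse_items_spec : Claim_equal_collapse_items := by
  intro items _
  unfold Spec_collapse_items collapse_items collapse_items_alt
  have hWL : (items.map (fun it => pvWords it.1)) = items.map (fun it => pvWords it.1) := rfl
  set wordsL := items.map (fun it => pvWords it.1) with hWLdef
  have hWLlen : wordsL.length = items.length := by rw [hWLdef]; simp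
  have hnd : ∀ j : Nat, (wordsL.getD j []).Nodup := by
    intro j
    rcases Nat.lt_or_ge j wordsL.length with hj | hj
    · rw [List.getD_eq_getElem _ _ hj]
      have hj' : j < items.length := by omega
      have he : wordsL[j] = pvWords (items[j]'hj').1 := by
        simp [hWLdef]
      rw [he]
      exact PySem.Set.nodup_ofList _
    · rw [List.getD_eq_default _ _ hj]
      exact List.nodup_nil
  have hD : ∀ w, (pvBuildIndex wordsL).getD w [] = pvPostings wordsL items.length w := by
    intro w
    rw [pv_build_spec wordsL hnd w, hWLlen]
  have henum : PySem.List.enumerate items 0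
      = (PySem.List.pyRange 0 items.length 1).map
          (fun j => (j, PySem.List.pyGetD items j pvDflt)) := by
    have h0 : PySem.List.enumerate items 0 = PySem.List.enumerate items := rfl
    rw [h0, PySem.List.enumerate_eq_map_pyRange items pvDflt]
    rfl
  rw [henum, List.foldl_map]
  have hmem : ∀ j ∈ PySem.List.pyRange 0 items.length 1, 0 ≤ j ∧ j < (items.length : Int) := by
    intro j hj
    rw [PySem.List.mem_pyRange_one] at hj
    exact hj
  have h := pv_fold_eq items wordsL (pvBuildIndex wordsL) hWLdef hD
    (PySem.List.pyRange 0 items.length 1) hmem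
    (List.replicate items.length false) [] (by simp)
  rw [h]
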